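-- pv_equiv track=rewrite | github.com/binshengliu/gdmtl | gdmtl/datasets/utils.py | get_dynamic_gradient_accumulation
-- ===== SOURCE A (Python) =====
-- from typing import Any, Dict, List, Optional, Sequence, Tuple, Union
--
-- def get_dynamic_gradient_accumulation(
--     batch_sizes: Sequence[int], effective_bsz: int
-- ) -> List[int]:
--     current_effective = 0
--     current_acc = 0
--     grad_accs = []
--     for bsz in batch_sizes:
--         current_effective += bsz
--         current_acc += 1
--         if current_effective >= effective_bsz:
--             grad_accs.extend([current_acc] + [0] * (current_acc - 1))
--             current_acc = 0
--             current_effective = 0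
--     if current_acc > 0:
--         grad_accs.extend([current_acc] + [0] * (current_acc - 1))
--         current_acc = 0
--         current_effective = 0
--     assert len(grad_accs) == len(batch_sizes)
--     return grad_accs
-- ===== SOURCE B (Python) =====
-- from typing import List, Sequence
--
--
-- def get_dynamic_gradient_accumulation(
--     batch_sizes: Sequence[int], effective_bsz: int
-- ) -> List[int]:
--     # Group-at-a-time: repeatedly locate the cut point of the NEXT group by
--     # scanning prefix sums of the remaining slice, emit its padded block, and
--     # slice the group off.  No cross-iteration running accumulator is kept.
--     rest = list(batch_sizes)
--     grad_accs: List[int] = []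
--     while rest:
--         total = 0
--         cut = len(rest)  # trailing partial group takes everything left
--         for i, b in enumerate(rest):
--             total += b
--             if total >= effective_bsz:
--                 cut = i + 1
--                 break
--         grad_accs += [cut] + [0] * (cut - 1)
--         rest = rest[cut:]
--     assert len(grad_accs) == len(batch_sizes)
--     return grad_accs
-- ===== Notes on version B (the rewrite author's own statement) =====
-- stated objective: alternative
-- what changed: B works group-at-a-time: a while loop that, for the remaining slice, finds the cut point of the next group by scanning its prefix sums, emits that group's padded block, and slices the group off the list, instead of A's single element-at-a-time loop threading a running sum and counter across iterations.
import Mathlib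
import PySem

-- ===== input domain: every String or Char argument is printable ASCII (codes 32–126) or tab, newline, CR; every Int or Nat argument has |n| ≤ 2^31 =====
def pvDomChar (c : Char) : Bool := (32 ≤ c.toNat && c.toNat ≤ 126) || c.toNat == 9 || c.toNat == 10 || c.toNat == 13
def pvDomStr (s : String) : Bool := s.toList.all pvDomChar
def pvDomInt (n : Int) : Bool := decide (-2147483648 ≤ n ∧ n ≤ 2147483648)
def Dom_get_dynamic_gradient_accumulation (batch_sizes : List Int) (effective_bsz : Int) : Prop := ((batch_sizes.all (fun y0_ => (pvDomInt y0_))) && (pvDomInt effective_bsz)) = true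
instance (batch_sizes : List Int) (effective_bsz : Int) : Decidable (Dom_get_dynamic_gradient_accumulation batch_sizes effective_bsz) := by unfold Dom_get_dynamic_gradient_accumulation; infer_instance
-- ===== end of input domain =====

-- B re-derives each group independently: a while loop that finds the next cut point by
-- scanning prefix sums of the remaining slice, emits the padded block and slices the group
-- off, instead of A's single element-at-a-time loop threading a running sum and counter.
-- Same cost order; objective: alternative decomposition. A is total.

-- ===== PORT A =====
-- [k] + [0] * (k - 1)  (Python's [0]*m is empty for m ≤ 0, as is toNat here)
def pvBlock (k : Int) : List Int := k :: List.replicate (k - 1).toNat 0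

-- A's for-loop: state (current_effective, current_acc, grad_accs)
def pvALoop (eb : Int) : List Int → Int → Int → List Int → Int × Int × List Int
  | [], ce, acc, out => (ce, acc, out)
  | b :: rest, ce, acc, out =>
      let ce' := ce + b
      let acc' := acc + 1
      if ce' ≥ eb then pvALoop eb rest 0 0 (out ++ pvBlock acc')
      else pvALoop eb rest ce' acc' out

def get_dynamic_gradient_accumulation (batch_sizes : List Int) (effective_bsz : Int) : List Int :=
  let s := pvALoop effective_bsz batch_sizes 0 0 []
  if s.2.1 > 0 then s.2.2 ++ pvBlock s.2.1 else s.2.2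

-- ===== PORT B =====
-- the inner for-loop: 1-based index of the first prefix of the slice whose sum reaches eb,
-- starting from partial sum `total`; falls through to the slice's length (trailing group)
def pvCut (eb total : Int) : List Int → Nat
  | [] => 0
  | b :: rest => if total + b ≥ eb then 1 else 1 + pvCut eb (total + b) rest

-- the while loop: emit the next group's block, recurse on the slice past the cut
-- (the head is always consumed: cut ≥ 1 on a nonempty slice, written as drop (cut-1) of the tail)
def pvBRec (eb : Int) : List Int → List Int
  | [] => []
  | b :: rest =>
      let c := pvCut eb 0 (b :: rest)
      pvBlock (c : Int) ++ pvBRec eb (rest.drop (c - 1))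
termination_by l => l.length
decreasing_by
  simp only [List.length_cons]
  exact Nat.lt_succ_of_le (by simp)

def get_dynamic_gradient_accumulation_alt (batch_sizes : List Int) (effective_bsz : Int) : List Int :=
  pvBRec effective_bsz batch_sizes

-- ===== PRECONDITION & SPEC =====
def Spec_get_dynamic_gradient_accumulation (batch_sizes : List Int) (effective_bsz : Int) (out : List Int) : Prop := out = get_dynamic_gradient_accumulation_alt batch_sizes effective_bsz
instance (batch_sizes : List Int) (effective_bsz : Int) (out : List Int) : Decidable (Spec_get_dynamic_gradient_accumulation batch_sizes effective_bsz out) := by unfold Spec_get_dynamic_gradient_accumulation; infer_instance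

-- ===== CLAIM (what is proved, stated in full; the proofs are below) =====
def Claim_equal_get_dynamic_gradient_accumulation : Prop := ∀ (batch_sizes : List Int) (effective_bsz : Int), Dom_get_dynamic_gradient_accumulation batch_sizes effective_bsz → Spec_get_dynamic_gradient_accumulation batch_sizes effective_bsz (get_dynamic_gradient_accumulation batch_sizes effective_bsz)

-- ===== LEMMAS AND PROOFS =====

-- what A's loop-plus-flush produces from a partial group with running sum ce and count cnt
def pvM (eb : Int) (bs : List Int) (ce cnt : Int) : List Int :=
  match bs with
  | [] => if cnt > 0 then pvBlock cnt else []
  | _ :: _ => pvBlock (cnt + (pvCut eb ce bs : Int)) ++ pvBRec eb (bs.drop (pvCut eb ce bs))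

theorem pvCut_pos (eb total : Int) (b : Int) (l : List Int) : 1 ≤ pvCut eb total (b :: l) := by
  simp only [pvCut]; split <;> omega

theorem pvBRec_eq_M (eb : Int) (l : List Int) : pvBRec eb l = pvM eb l 0 0 := by
  cases l with
  | nil => simp [pvBRec, pvM]
  | cons b rest =>
      rw [pvBRec, pvM]
      have h1 := pvCut_pos eb 0 b rest
      have : (b :: rest).drop (pvCut eb 0 (b :: rest)) = rest.drop (pvCut eb 0 (b :: rest) - 1) := by
        obtain ⟨k, hk⟩ : ∃ k, pvCut eb 0 (b :: rest) = k + 1 := ⟨_, (Nat.succ_pred_eq_of_pos h1).symm⟩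
        simp [hk]
      rw [this]
      simp

theorem pvLoop_corr (eb : Int) (bs : List Int) : ∀ (ce cnt : Int) (out : List Int), 0 ≤ cnt →
    (let s := pvALoop eb bs ce cnt out
     if s.2.1 > 0 then s.2.2 ++ pvBlock s.2.1 else s.2.2)
      = out ++ pvM eb bs ce cnt := by
  induction bs with
  | nil =>
      intro ce cnt out _
      simp only [pvALoop, pvM]
      split <;> simp
  | cons b rest ih =>
      intro ce cnt out hcnt
      simp only [pvALoop]
      by_cases h : ce + b ≥ eb
      · simp only [h, if_pos]
        rw [ih 0 0 (out ++ pvBlock (cnt + 1)) le_rfl]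
        rw [pvM]
        have hc : pvCut eb ce (b :: rest) = 1 := by simp [pvCut, h]
        rw [hc]
        simp [pvBRec_eq_M]
      · simp only [h, if_false]
        rw [ih (ce + b) (cnt + 1) out (by omega)]
        have hc : pvCut eb ce (b :: rest) = 1 + pvCut eb (ce + b) rest := by
          simp [pvCut, h]
        cases rest with
        | nil =>
            simp only [pvM]
            have hc1 : pvCut eb ce [b] = 1 := by simp [pvCut, h]
            rw [hc1]
            simp [pvBRec, pvBlock, show cnt + 1 > 0 by omega]
        | cons r rr =>
            rw [pvM, pvM, hc]
            have : ((1 + pvCut eb (ce + b) (r :: rr) : Nat) : Int)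
                = 1 + (pvCut eb (ce + b) (r :: rr) : Int) := by push_cast; ring
            rw [this]
            have hd : (b :: r :: rr).drop (1 + pvCut eb (ce + b) (r :: rr))
                = (r :: rr).drop (pvCut eb (ce + b) (r :: rr)) := by
              rw [Nat.add_comm]; simp
            rw [hd]
            ring_nf

-- ===== VERDICT (by name: the statement is the Claim_ definition above) =====
theorem get_dynamic_gradient_accumulation_spec : Claim_equal_get_dynamic_gradient_accumulation := by
  intro bs eb _
  show _ = _
  have h := pvLoop_corr eb bs 0 0 [] le_rfl
  simpa [get_dynamic_gradient_accumulation, get_dynamic_gradient_accumulation_alt, pvBRec_eq_M]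
    using h
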